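-- pv_equiv track=rewrite | github.com/yabadabaduca/VultureWatch | vulturewatch/collectors/github.py | _assess_maturity
-- ===== SOURCE A (Python) =====
-- from typing import List, Dict, Optional
--
-- def _assess_maturity(repo: Dict) -> int:
--     """
--     Avalia maturidade baseado em indicadores do repositório
--
--     Returns:
--         0-3: nível de maturidade
--     """
--     name = repo.get("name", "").lower()
--     description = repo.get("description", "").lower()
--
--     # Indicadores de maturidade alta
--     if any(keyword in name or keyword in description
--            for keyword in ["metasploit", "exploit", "module"]):
--         return 3
--
--     # Indicadores de PoC funcional
--     if any(keyword in name or keyword in description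
--            for keyword in ["poc", "proof-of-concept", "exploit", "cve"]):
--         return 2
--
--     # Caso padrão
--     return 1
-- ===== SOURCE B (Python) =====
-- _LEVELS = (("metasploit", 3), ("exploit", 3), ("module", 3),
--            ("poc", 2), ("proof-of-concept", 2), ("cve", 2))
--
--
-- def _assess_maturity(repo):
--     name = repo.get("name", "").lower()
--     description = repo.get("description", "").lower()
--     best = 1
--     for kw, lvl in _LEVELS:
--         if kw in name or kw in description:
--             best = max(best, lvl)
--     return best
-- ===== Notes on version B (the rewrite author's own statement) =====
-- stated objective: idiomatic
-- what changed: Replaces the two early-return any() tiers with a single keyword->level table folded with max (default 1), so the tier logic becomes data instead of control flow.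
import Mathlib
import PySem

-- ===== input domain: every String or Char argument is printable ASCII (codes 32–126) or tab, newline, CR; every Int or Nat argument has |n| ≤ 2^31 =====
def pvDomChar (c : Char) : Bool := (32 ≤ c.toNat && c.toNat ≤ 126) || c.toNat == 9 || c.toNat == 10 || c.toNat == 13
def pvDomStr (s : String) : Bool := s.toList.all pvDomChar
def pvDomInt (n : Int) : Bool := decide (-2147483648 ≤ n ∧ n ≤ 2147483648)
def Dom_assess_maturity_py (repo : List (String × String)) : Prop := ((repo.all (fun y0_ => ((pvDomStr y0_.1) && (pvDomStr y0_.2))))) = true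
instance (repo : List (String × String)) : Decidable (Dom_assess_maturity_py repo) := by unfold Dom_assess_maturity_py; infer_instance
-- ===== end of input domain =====

-- B replaces A's two early-return any() tiers by a keyword->level table folded with max (idiomatic; same cost).

-- ===== PORT A =====
def assess_maturity_py (repo : List (String × String)) : Int :=
  let name := PySem.Str.lower (PySem.Dict.getD (PySem.Dict.ofList repo) "name" "")
  let description := PySem.Str.lower (PySem.Dict.getD (PySem.Dict.ofList repo) "description" "")
  if (["metasploit", "exploit", "module"].any
      (fun keyword => PySem.Str.isIn keyword name || PySem.Str.isIn keyword description)) then 3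
  else if (["poc", "proof-of-concept", "exploit", "cve"].any
      (fun keyword => PySem.Str.isIn keyword name || PySem.Str.isIn keyword description)) then 2
  else 1

-- ===== PORT B =====
def assess_maturity_py_alt (repo : List (String × String)) : Int :=
  let name := PySem.Str.lower (PySem.Dict.getD (PySem.Dict.ofList repo) "name" "")
  let description := PySem.Str.lower (PySem.Dict.getD (PySem.Dict.ofList repo) "description" "")
  ([("metasploit", (3 : Int)), ("exploit", 3), ("module", 3),
    ("poc", 2), ("proof-of-concept", 2), ("cve", 2)]).foldl
    (fun best p =>
      if (PySem.Str.isIn p.1 name || PySem.Str.isIn p.1 description) = true then max best p.2 else best)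
    1

-- ===== PRECONDITION & SPEC =====
def Spec_assess_maturity_py (repo : List (String × String)) (out : Int) : Prop := out = assess_maturity_py_alt repo
instance (repo : List (String × String)) (out : Int) : Decidable (Spec_assess_maturity_py repo out) := by unfold Spec_assess_maturity_py; infer_instance

-- ===== CLAIM (what is proved, stated in full; the proofs are below) =====
def Claim_equal_assess_maturity_py : Prop := ∀ (repo : List (String × String)), Dom_assess_maturity_py repo → Spec_assess_maturity_py repo (assess_maturity_py repo)

-- ===== LEMMAS AND PROOFS =====
theorem assess_core (n d : String) :
    (if (["metasploit", "exploit", "module"].any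
        (fun keyword => PySem.Str.isIn keyword n || PySem.Str.isIn keyword d)) then (3 : Int)
     else if (["poc", "proof-of-concept", "exploit", "cve"].any
        (fun keyword => PySem.Str.isIn keyword n || PySem.Str.isIn keyword d)) then 2
     else 1)
    = ([("metasploit", (3 : Int)), ("exploit", 3), ("module", 3),
        ("poc", 2), ("proof-of-concept", 2), ("cve", 2)]).foldl
        (fun best p =>
          if (PySem.Str.isIn p.1 n || PySem.Str.isIn p.1 d) = true then max best p.2 else best)
        1 := by
  simp only [List.any_cons, List.any_nil, List.foldl_cons, List.foldl_nil, Bool.or_false]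
  generalize (PySem.Str.isIn "metasploit" n || PySem.Str.isIn "metasploit" d) = a1
  generalize (PySem.Str.isIn "exploit" n || PySem.Str.isIn "exploit" d) = a2
  generalize (PySem.Str.isIn "module" n || PySem.Str.isIn "module" d) = a3
  generalize (PySem.Str.isIn "poc" n || PySem.Str.isIn "poc" d) = a4
  generalize (PySem.Str.isIn "proof-of-concept" n || PySem.Str.isIn "proof-of-concept" d) = a5
  generalize (PySem.Str.isIn "cve" n || PySem.Str.isIn "cve" d) = a6
  revert a1 a2 a3 a4 a5 a6
  decide

-- ===== VERDICT (by name: the statement is the Claim_ definition above) =====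
theorem assess_maturity_py_spec : Claim_equal_assess_maturity_py := by
  intro repo _
  unfold Spec_assess_maturity_py assess_maturity_py assess_maturity_py_alt
  exact assess_core _ _
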